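-- pv_equiv track=rewrite | github.com/AP-MI-2021/lab-4-camigroza | main.py | verifica_nr_pozitive_ordine_cresc
-- ===== SOURCE A (Python) =====
-- def verifica_nr_pozitive_ordine_cresc(l):
--     '''
--     Verifica daca toate numerele pozitive din lista sunt in ordine crescatoare
--     :param l: o lista de numere intregi
--     :return: "DA", daca toate numerele pozitive din lista sunt in ordine crescatoare,
--             "NU" in caz contrar
--     '''
--     lista_pozitive = []
--     for x in l:
--         if x >= 0:
--             lista_pozitive.append(x)
--     for i in range(len(lista_pozitive)-1):
--         if lista_pozitive[i]>lista_pozitive[i+1]: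
--             return "NU"
--     return "DA"
-- ===== SOURCE B (Python) =====
-- def verifica_nr_pozitive_ordine_cresc(l):
--     '''
--     Verifica daca toate numerele pozitive din lista sunt in ordine crescatoare
--     :param l: o lista de numere intregi
--     :return: "DA"/"NU"
--     '''
--     prev = None
--     for x in l:
--         if x >= 0:
--             if prev is not None and prev > x:
--                 return "NU"
--             prev = x
--     return "DA"
-- ===== Notes on version B (the rewrite author's own statement) =====
-- stated objective: simpler
-- what changed: Single pass keeping only the previous non-negative value in a scalar, instead of building an intermediate list of positives and re-scanning it by index.
import Mathlib
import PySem

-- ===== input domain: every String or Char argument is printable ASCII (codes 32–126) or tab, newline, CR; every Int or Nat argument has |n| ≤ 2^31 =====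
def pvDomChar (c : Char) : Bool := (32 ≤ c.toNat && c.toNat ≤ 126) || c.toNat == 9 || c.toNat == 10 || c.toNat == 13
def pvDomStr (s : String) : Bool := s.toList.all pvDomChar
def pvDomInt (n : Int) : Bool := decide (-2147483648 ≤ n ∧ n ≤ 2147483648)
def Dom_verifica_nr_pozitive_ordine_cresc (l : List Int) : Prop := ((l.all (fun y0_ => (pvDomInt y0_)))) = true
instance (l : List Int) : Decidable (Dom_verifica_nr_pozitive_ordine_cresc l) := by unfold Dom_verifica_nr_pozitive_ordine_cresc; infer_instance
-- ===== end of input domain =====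

-- B replaces A's intermediate positives list + index re-scan by a single pass keeping one scalar `prev` (objective: simpler).
-- ===== PORT A =====
-- the second loop of A: 'for i in range(len(lista_pozitive)-1): if lista_pozitive[i] > lista_pozitive[i+1]: return "NU"'
def pvACheck (pos : List Int) : List Int → String
  | [] => "DA"
  | i :: rest =>
    if PySem.List.pyGetD pos i 0 > PySem.List.pyGetD pos (i + 1) 0 then "NU"
    else pvACheck pos rest

def verifica_nr_pozitive_ordine_cresc (l : List Int) : String :=
  let lista_pozitive := l.foldl (fun acc x => if x ≥ 0 then acc ++ [x] else acc) []
  pvACheck lista_pozitive (PySem.List.pyRange 0 ((lista_pozitive.length : Int) - 1) 1)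

-- ===== PORT B =====
-- B's loop: prev is None or the last non-negative value seen
def pvBLoop : Option Int → List Int → String
  | _, [] => "DA"
  | prev, x :: rest =>
    if x ≥ 0 then
      match prev with
      | some p => if p > x then "NU" else pvBLoop (some x) rest
      | none => pvBLoop (some x) rest
    else pvBLoop prev rest

def verifica_nr_pozitive_ordine_cresc_alt (l : List Int) : String :=
  pvBLoop none l

-- ===== PRECONDITION & SPEC =====
def Spec_verifica_nr_pozitive_ordine_cresc (l : List Int) (out : String) : Prop := out = verifica_nr_pozitive_ordine_cresc_alt l
instance (l : List Int) (out : String) : Decidable (Spec_verifica_nr_pozitive_ordine_cresc l out) := by unfold Spec_verifica_nr_pozitive_ordine_cresc; infer_instance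

-- ===== CLAIM (what is proved, stated in full; the proofs are below) =====
def Claim_equal_verifica_nr_pozitive_ordine_cresc : Prop := ∀ (l : List Int), Dom_verifica_nr_pozitive_ordine_cresc l → Spec_verifica_nr_pozitive_ordine_cresc l (verifica_nr_pozitive_ordine_cresc l)

-- ===== LEMMAS AND PROOFS =====

-- proof-side characterisation: "NU" iff some adjacent pair of the list strictly decreases
def pairScan : List Int → String
  | [] => "DA"
  | [_] => "DA"
  | x :: y :: rest => if x > y then "NU" else pairScan (y :: rest)

theorem pairScan_short (xs : List Int) (h : xs.length ≤ 1) : pairScan xs = "DA" := by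
  match xs with
  | [] => rfl
  | [_] => rfl
  | _ :: _ :: _ => simp at h

theorem pvACheck_eq_pairScan (xs : List Int) (k : Nat) :
    pvACheck xs (PySem.List.pyRange (k : Int) ((xs.length : Int) - 1) 1) = pairScan (xs.drop k) := by
  by_cases hk : (xs.length : Int) - 1 ≤ (k : Int)
  · rw [PySem.List.pyRange_one_eq_nil hk, pvACheck]
    exact (pairScan_short _ (by simp; omega)).symm
  · push Not at hk
    have hk1 : k + 1 < xs.length := by omega
    have hk0 : k < xs.length := by omega
    rw [PySem.List.pyRange_one_cons (by omega), pvACheck]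
    have e1 : (k : Int) + 1 = ((k + 1 : Nat) : Int) := by push_cast; ring
    rw [PySem.List.pyGetD_eq_getElem xs 0 (by positivity) (by exact_mod_cast hk0), e1,
      PySem.List.pyGetD_eq_getElem xs 0 (by positivity) (by exact_mod_cast hk1)]
    rw [List.drop_eq_getElem_cons hk0, List.drop_eq_getElem_cons hk1]
    simp only [Int.toNat_natCast, pairScan]
    split
    · rfl
    · have := pvACheck_eq_pairScan xs (k + 1)
      rw [List.drop_eq_getElem_cons hk1] at this
      exact_mod_cast this
termination_by xs.length - k

theorem pvBLoop_eq_pairScan (l : List Int) (o : Option Int) :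
    pvBLoop o l = pairScan (o.toList ++ l.filter (fun x => x ≥ 0)) := by
  induction l generalizing o with
  | nil => cases o <;> rfl
  | cons x rest ih =>
    by_cases hx : x ≥ 0
    · have hd : decide (x ≥ 0) = true := decide_eq_true hx
      cases o with
      | none =>
        rw [show pvBLoop none (x :: rest)
            = if x ≥ 0 then pvBLoop (some x) rest else pvBLoop none rest from rfl, if_pos hx]
        simpa [hd] using ih (some x)
      | some p =>
        rw [show pvBLoop (some p) (x :: rest)
            = if x ≥ 0 then (if p > x then "NU" else pvBLoop (some x) rest)
              else pvBLoop (some p) rest from rfl, if_pos hx]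
        simp only [List.filter_cons, hd, if_true, Option.toList, List.cons_append,
          List.nil_append]
        rw [show pairScan (p :: x :: rest.filter (fun x => decide (x ≥ 0)))
            = if p > x then "NU"
              else pairScan (x :: rest.filter (fun x => decide (x ≥ 0))) from rfl]
        split
        · rfl
        · simpa using ih (some x)
    · have hd : decide (x ≥ 0) = false := decide_eq_false hx
      cases o with
      | none =>
        rw [show pvBLoop none (x :: rest)
            = if x ≥ 0 then pvBLoop (some x) rest else pvBLoop none rest from rfl, if_neg hx]
        simpa [hd] using ih none
      | some p =>
        rw [show pvBLoop (some p) (x :: rest)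
            = if x ≥ 0 then (if p > x then "NU" else pvBLoop (some x) rest)
              else pvBLoop (some p) rest from rfl, if_neg hx]
        simpa [hd] using ih (some p)

theorem verifica_nr_pozitive_ordine_cresc_spec : Claim_equal_verifica_nr_pozitive_ordine_cresc := by
  intro l _
  unfold Spec_verifica_nr_pozitive_ordine_cresc verifica_nr_pozitive_ordine_cresc
    verifica_nr_pozitive_ordine_cresc_alt
  rw [show (fun (acc : List Int) x => if x ≥ 0 then acc ++ [x] else acc)
      = (fun acc x => if (decide (x ≥ 0)) = true then acc ++ [id x] else acc) by
        funext acc x; simp]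
  rw [PySem.List.foldl_append_if (fun x => decide (x ≥ 0)) id l []]
  simp only [List.nil_append, List.map_id]
  have := pvACheck_eq_pairScan (l.filter (fun x => decide (x ≥ 0))) 0
  simp only [Nat.cast_zero, List.drop_zero] at this
  rw [this, pvBLoop_eq_pairScan l none]
  rfl
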